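-- pv_equiv track=rewrite | github.com/MegenisJ/Large-Dataset-Search-Algorithm | DocSearch.py | generateMatchingDocuments
-- ===== SOURCE A (Python) =====
-- def generateMatchingDocuments(Match,keyslist):
--
-- 	inAllDocuments = True
-- 	for x in keyslist[0]:
-- 		inAllDocuments = True
-- 		for i in range(len(keyslist)):
-- 			if x not in keyslist[i]:
-- 				inAllDocuments = False
-- 		if inAllDocuments == True:
-- 			Match.append(x) #Match is a list of all the documents that math the search terms
-- 	return(Match)
-- ===== SOURCE B (Python) =====
-- def generateMatchingDocuments(Match, keyslist):
--     # progressive intersection: shrink the candidate list one keys-list at a time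
--     result = list(keyslist[0])
--     for lst in keyslist[1:]:
--         s = set(lst)
--         result = [x for x in result if x in s]
--     Match.extend(result)
--     return Match
-- ===== Notes on version B (the rewrite author's own statement) =====
-- stated objective: faster
-- what changed: Replaces the per-element scan of every keys list (nested loops with an in-all flag) by a progressive fold: the candidate list from keyslist[0] is filtered once per remaining list against a set built from that list.
-- outside the precondition, e.g. on generateMatchingDocuments([], []): A raises IndexError, B raises IndexError
import Mathlib
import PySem

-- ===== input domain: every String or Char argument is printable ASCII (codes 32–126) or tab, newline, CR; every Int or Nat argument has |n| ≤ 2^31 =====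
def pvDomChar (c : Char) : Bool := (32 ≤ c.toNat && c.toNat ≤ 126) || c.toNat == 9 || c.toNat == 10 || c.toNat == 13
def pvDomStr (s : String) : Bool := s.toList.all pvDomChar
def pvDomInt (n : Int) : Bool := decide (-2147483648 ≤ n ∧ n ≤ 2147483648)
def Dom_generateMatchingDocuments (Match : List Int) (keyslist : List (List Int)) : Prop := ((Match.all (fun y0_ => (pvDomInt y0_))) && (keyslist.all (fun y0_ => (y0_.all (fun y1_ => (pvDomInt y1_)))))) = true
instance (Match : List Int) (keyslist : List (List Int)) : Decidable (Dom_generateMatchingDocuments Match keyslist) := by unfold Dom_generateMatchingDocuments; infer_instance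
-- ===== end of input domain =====

-- B replaces A's per-element scan of every list by a progressive filter with one set per remaining list (objective: faster).
-- Both versions mutate/extend the Match argument in Python; the equivalence proved here is about the return value only.

-- ===== PORT A =====
def generateMatchingDocuments (Match : List Int) (keyslist : List (List Int)) : List Int :=
  ((PySem.List.pyGet? keyslist 0).getD []).foldl (fun acc x =>
    let inAll := keyslist.foldl (fun b lst => if !(lst.contains x) then false else b) true
    if inAll then acc ++ [x] else acc) Match

-- ===== PORT B =====
def generateMatchingDocuments_alt (Match : List Int) (keyslist : List (List Int)) : List Int :=
  let result := (PySem.List.pyGet? keyslist 0).getD []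
  let result := (PySem.List.slice keyslist (some 1) none).foldl (fun res lst =>
    let s := PySem.Set.ofList lst
    res.filter (fun x => PySem.Set.contains s x)) result
  Match ++ result

-- ===== PRECONDITION & SPEC =====
-- Pre_ excludes the empty keyslist, on which both Pythons raise IndexError (keyslist[0]).
def Pre_generateMatchingDocuments (Match : List Int) (keyslist : List (List Int)) : Prop := keyslist ≠ []
instance (Match : List Int) (keyslist : List (List Int)) : Decidable (Pre_generateMatchingDocuments Match keyslist) := by unfold Pre_generateMatchingDocuments; infer_instance
def pvWitness_generateMatchingDocuments : List Int × List (List Int) := ([7], [[1, 2, 3], [2, 3, 4]])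

def Spec_generateMatchingDocuments (Match : List Int) (keyslist : List (List Int)) (out : List Int) : Prop := out = generateMatchingDocuments_alt Match keyslist
instance (Match : List Int) (keyslist : List (List Int)) (out : List Int) : Decidable (Spec_generateMatchingDocuments Match keyslist out) := by unfold Spec_generateMatchingDocuments; infer_instance

-- ===== CLAIM (what is proved, stated in full; the proofs are below) =====
def Claim_equal_generateMatchingDocuments : Prop := ∀ (Match : List Int) (keyslist : List (List Int)), Dom_generateMatchingDocuments Match keyslist → Pre_generateMatchingDocuments Match keyslist → Spec_generateMatchingDocuments Match keyslist (generateMatchingDocuments Match keyslist)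

-- ===== LEMMAS AND PROOFS =====

-- A's inner flag loop computes "x is contained in every list of l" (given the initial flag b0).
theorem foldl_flag_eq_all (l : List (List Int)) (x : Int) (b0 : Bool) :
    l.foldl (fun b lst => if !(lst.contains x) then false else b) b0
      = (b0 && l.all (fun lst => lst.contains x)) := by
  induction l generalizing b0 with
  | nil => simp
  | cons h t ih =>
    simp only [List.foldl_cons, List.all_cons, ih]
    cases hc : h.contains x <;> simp

-- B's progressive filter over the remaining lists equals one filter by the all-check.
theorem foldl_filter_eq_filter_all (rest : List (List Int)) (k0 : List Int) :
    rest.foldl (fun res lst =>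
        res.filter (fun x => PySem.Set.contains (PySem.Set.ofList lst) x)) k0
      = k0.filter (fun x => rest.all (fun lst => lst.contains x)) := by
  induction rest generalizing k0 with
  | nil => simp
  | cons h t ih =>
    simp only [List.foldl_cons, ih, List.filter_filter, List.all_cons]
    apply List.filter_congr
    intro x _
    simp [PySem.Set.contains, PySem.Set.mem_ofList, Bool.and_comm]

theorem generateMatchingDocuments_eq (Match : List Int) (k0 : List Int) (rest : List (List Int)) :
    generateMatchingDocuments Match (k0 :: rest) = generateMatchingDocuments_alt Match (k0 :: rest) := by
  unfold generateMatchingDocuments generateMatchingDocuments_alt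
  simp only [PySem.List.slice_from_one, List.tail_cons]
  have hget : (PySem.List.pyGet? (k0 :: rest) 0).getD [] = k0 := by
    simp [PySem.List.pyGet?, PySem.List.pyIdx?]
  rw [hget, foldl_filter_eq_filter_all]
  have step : (k0.foldl (fun acc x =>
      let inAll := (k0 :: rest).foldl (fun b lst => if !(lst.contains x) then false else b) true
      if inAll then acc ++ [x] else acc) Match)
      = Match ++ k0.filter (fun x => (k0 :: rest).all (fun lst => lst.contains x)) := by
    simp only [foldl_flag_eq_all, Bool.true_and]
    exact PySem.List.foldl_append_if_eq_filter _ _ _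
  rw [step]
  congr 1
  apply List.filter_congr
  intro x hx
  simp [List.all_cons, hx]

-- ===== VERDICT (by name: the statement is the Claim_ definition above) =====
theorem generateMatchingDocuments_spec : Claim_equal_generateMatchingDocuments := by
  intro Match keyslist _ hpre
  cases keyslist with
  | nil => exact absurd rfl hpre
  | cons k0 rest => exact generateMatchingDocuments_eq Match k0 rest
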